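-- pv_equiv track=rewrite | github.com/idan82labs/82ARC | arc_solver/services/orchestrator.py | _ensemble_predictions
-- ===== SOURCE A (Python) =====
-- from typing import List, Dict, Optional, Any, Tuple
--
-- def _ensemble_predictions(predictions: List[List[List[int]]]) -> List[List[int]]:
--     """Cell-by-cell majority vote across predictions."""
--     if len(predictions) <= 1:
--         return predictions[0] if predictions else []
--
--     # Find common dimensions (use the most common dimensions)
--     heights = [len(p) for p in predictions if p]
--     widths = [len(p[0]) for p in predictions if p and p[0]]
--
--     if not heights or not widths:
--         return predictions[0] if predictions else []
--
--     from collections import Counter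
--     height = Counter(heights).most_common(1)[0][0]
--     width = Counter(widths).most_common(1)[0][0]
--
--     # Majority vote per cell
--     result = []
--     for i in range(height):
--         row = []
--         for j in range(width):
--             votes = [p[i][j] for p in predictions if i < len(p) and j < len(p[i])]
--             if votes:
--                 most_common = Counter(votes).most_common(1)[0][0]
--                 row.append(most_common)
--             else:
--                 row.append(0)
--         result.append(row)
--
--     return result
-- ===== SOURCE B (Python) =====
-- from typing import List
--
-- def _ensemble_predictions(predictions: List[List[List[int]]]) -> List[List[int]]:
--     """Cell-by-cell majority vote: one pass over predictions into a flat vote-count dict."""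
--     if len(predictions) <= 1:
--         return predictions[0] if predictions else []
--
--     heights = [len(p) for p in predictions if p]
--     widths = [len(p[0]) for p in predictions if p and p[0]]
--
--     if not heights or not widths:
--         return predictions[0] if predictions else []
--
--     from collections import Counter
--     height = Counter(heights).most_common(1)[0][0]
--     width = Counter(widths).most_common(1)[0][0]
--
--     # One pass: count every vote, keyed by (row, col, value), in prediction order.
--     cnt = {}
--     for p in predictions:
--         for i in range(min(height, len(p))):
--             row = p[i]
--             for j in range(min(width, len(row))):
--                 k = (i, j, row[j])
--                 cnt[k] = cnt.get(k, 0) + 1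
--
--     # One pass over the counts: per cell keep the first value reaching the max count
--     # (dict insertion order = first-occurrence order, so ties break like Counter.most_common).
--     best = {}
--     for (i, j, v), c in cnt.items():
--         cur = best.get((i, j))
--         if cur is None or c > cur[0]:
--             best[(i, j)] = (c, v)
--
--     return [[best[(i, j)][1] if (i, j) in best else 0 for j in range(width)]
--             for i in range(height)]
-- ===== Notes on version B (the rewrite author's own statement) =====
-- stated objective: alternative
-- what changed: A rescans the whole prediction list once per cell to build a votes list and a fresh Counter; B makes a single pass over the predictions accumulating one flat (row, col, value) -> count dict and then one pass over that dict keeping, per cell, the first value reaching the maximal count (insertion order reproduces Counter.most_common tie-breaking).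
import Mathlib
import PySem

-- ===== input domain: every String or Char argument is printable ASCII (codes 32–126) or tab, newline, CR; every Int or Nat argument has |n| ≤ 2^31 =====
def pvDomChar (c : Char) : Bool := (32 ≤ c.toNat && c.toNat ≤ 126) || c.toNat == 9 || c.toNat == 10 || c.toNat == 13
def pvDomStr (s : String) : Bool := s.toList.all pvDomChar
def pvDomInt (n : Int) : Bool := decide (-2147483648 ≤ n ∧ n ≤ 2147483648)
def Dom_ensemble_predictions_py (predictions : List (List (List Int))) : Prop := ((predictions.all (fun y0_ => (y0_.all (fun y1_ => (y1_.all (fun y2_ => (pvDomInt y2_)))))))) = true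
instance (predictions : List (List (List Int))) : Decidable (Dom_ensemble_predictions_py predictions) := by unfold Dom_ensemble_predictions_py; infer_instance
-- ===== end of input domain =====

-- B replaces A's per-cell rescans of all predictions by ONE pass over the predictions into a
-- flat (row, col, value) → count dict plus one pass over that dict (objective: alternative decomposition).

-- ===== PORT A =====
-- Counter(xs).most_common(1)[0][0] over a counter's items: the first item reaching the maximal
-- count (Python's tie-break: the earlier-inserted key wins).
def pvMostCommon1 (items : List (Int × Int)) : Option (Int × Int) :=
  items.foldl (fun best kv =>
    match best with
    | none => some kv
    | some b => if b.2 < kv.2 then some kv else some b) none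

def pvMostCommonKey (xs : List Int) : Int :=
  (pvMostCommon1 (PySem.Dict.counter xs).items).elim 0 (·.1)

-- votes = [p[i][j] for p in predictions if i < len(p) and j < len(p[i])]
def pvVotes (predictions : List (List (List Int))) (i j : Int) : List Int :=
  predictions.filterMap (fun p =>
    if i < (p.length : Int) ∧ j < ((PySem.List.pyGetD p i []).length : Int)
    then some (PySem.List.pyGetD (PySem.List.pyGetD p i []) j 0) else none)

def ensemble_predictions_py (predictions : List (List (List Int))) : List (List Int) :=
  if predictions.length ≤ 1 then predictions.headD []
  else
    let heights := predictions.filterMap (fun p => if p.isEmpty then none else some ((p.length : Int)))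
    let widths := predictions.filterMap (fun p => if p.isEmpty || (p.headD []).isEmpty then none else some (((p.headD []).length : Int)))
    if heights.isEmpty || widths.isEmpty then predictions.headD []
    else
      let height := pvMostCommonKey heights
      let width := pvMostCommonKey widths
      (PySem.List.pyRange 0 height 1).map (fun i =>
        (PySem.List.pyRange 0 width 1).map (fun j =>
          let votes := pvVotes predictions i j
          if votes.isEmpty then 0 else pvMostCommonKey votes))

-- ===== PORT B =====
-- one pass over predictions: cnt[(i, j, p[i][j])] += 1
def pvCnt (predictions : List (List (List Int))) (height width : Int) :
    PySem.Dict (Int × Int × Int) Int :=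
  predictions.foldl (fun cnt p =>
    (PySem.List.pyRange 0 (min height (p.length : Int)) 1).foldl (fun cnt i =>
      let row := PySem.List.pyGetD p i []
      (PySem.List.pyRange 0 (min width (row.length : Int)) 1).foldl (fun cnt j =>
        let k := (i, j, PySem.List.pyGetD row j 0)
        cnt.insert k (cnt.getD k 0 + 1)) cnt) cnt) PySem.Dict.empty

-- one pass over the counts: per cell keep the first value reaching the max count
def pvBest (cnt : PySem.Dict (Int × Int × Int) Int) : PySem.Dict (Int × Int) (Int × Int) :=
  cnt.items.foldl (fun best kv =>
    match best.get? (kv.1.1, kv.1.2.1) with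
    | none => best.insert (kv.1.1, kv.1.2.1) (kv.2, kv.1.2.2)
    | some cur =>
        if cur.1 < kv.2 then best.insert (kv.1.1, kv.1.2.1) (kv.2, kv.1.2.2) else best)
    PySem.Dict.empty

def ensemble_predictions_py_alt (predictions : List (List (List Int))) : List (List Int) :=
  if predictions.length ≤ 1 then predictions.headD []
  else
    let heights := predictions.filterMap (fun p => if p.isEmpty then none else some ((p.length : Int)))
    let widths := predictions.filterMap (fun p => if p.isEmpty || (p.headD []).isEmpty then none else some (((p.headD []).length : Int)))
    if heights.isEmpty || widths.isEmpty then predictions.headD []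
    else
      let height := pvMostCommonKey heights
      let width := pvMostCommonKey widths
      let best := pvBest (pvCnt predictions height width)
      (PySem.List.pyRange 0 height 1).map (fun i =>
        (PySem.List.pyRange 0 width 1).map (fun j =>
          match best.get? (i, j) with
          | some cv => cv.2
          | none => 0))

-- ===== PRECONDITION & SPEC =====
def Spec_ensemble_predictions_py (predictions : List (List (List Int))) (out : List (List Int)) : Prop := out = ensemble_predictions_py_alt predictions
instance (predictions : List (List (List Int))) (out : List (List Int)) : Decidable (Spec_ensemble_predictions_py predictions out) := by unfold Spec_ensemble_predictions_py; infer_instance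

-- ===== CLAIM (what is proved, stated in full; the proofs are below) =====
def Claim_equal_ensemble_predictions_py : Prop := ∀ (predictions : List (List (List Int))), Dom_ensemble_predictions_py predictions → Spec_ensemble_predictions_py predictions (ensemble_predictions_py predictions)

-- ===== LEMMAS AND PROOFS =====

-- the flat stream of triples (i, j, p[i][j]) that pvCnt counts, in insertion order
def pvT (predictions : List (List (List Int))) (height width : Int) : List (Int × Int × Int) :=
  predictions.flatMap (fun p =>
    (PySem.List.pyRange 0 (min height (p.length : Int)) 1).flatMap (fun i =>
      (PySem.List.pyRange 0 (min width ((PySem.List.pyGetD p i []).length : Int)) 1).map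
        (fun j => (i, j, PySem.List.pyGetD (PySem.List.pyGetD p i []) j 0))))

-- the (value, count) pairs of a flat count list that belong to cell (i, j), in order
def pvProj (L : List ((Int × Int × Int) × Int)) (i j : Int) : List (Int × Int) :=
  L.filterMap (fun kv => if kv.1.1 = i ∧ kv.1.2.1 = j then some (kv.1.2.2, kv.2) else none)

-- pvBest's per-cell effect, as a fold over that cell's (value, count) pairs
def pvScan (o : Option (Int × Int)) (L : List (Int × Int)) : Option (Int × Int) :=
  L.foldl (fun b vc =>
    match b with
    | none => some (vc.2, vc.1)
    | some cur => if cur.1 < vc.2 then some (vc.2, vc.1) else some cur) o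

lemma pvRangeCast (n : Nat) :
    PySem.List.pyRange 0 (n : Int) 1 = (List.range n).map (fun k : Nat => (k : Int)) := by
  simp [PySem.List.pyRange_zero_natCast, List.map_eq_flatMap]

lemma pvScan_eq_mostCommon (L : List (Int × Int)) (o : Option (Int × Int)) :
    pvScan (o.map Prod.swap) L
      = (L.foldl (fun best kv =>
          match best with
          | none => some kv
          | some b => if b.2 < kv.2 then some kv else some b) o).map Prod.swap := by
  induction L generalizing o with
  | nil => rfl
  | cons x L ih =>
      cases o with
      | none =>
          have h := ih (some x)
          simp only [Option.map_some, Prod.swap_prod_mk, Prod.mk.eta] at h ⊢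
          simpa [pvScan, Prod.swap] using h
      | some b =>
          by_cases h : b.2 < x.2
          · have h2 := ih (some x)
            simp only [Option.map_some] at h2 ⊢
            simpa [pvScan, Prod.swap, h] using h2
          · have h2 := ih (some b)
            simp only [Option.map_some] at h2 ⊢
            simpa [pvScan, Prod.swap, h] using h2

lemma pvFold_mem (L : List (Int × Int)) (o : Option (Int × Int)) (b : Int × Int)
    (h : L.foldl (fun best kv =>
      match best with
      | none => some kv
      | some b => if b.2 < kv.2 then some kv else some b) o = some b) :
    b ∈ L ∨ o = some b := by
  induction L generalizing o with
  | nil => exact Or.inr h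
  | cons x L ih =>
      simp only [List.foldl_cons] at h
      rcases ih _ h with h' | h'
      · exact Or.inl (List.mem_cons_of_mem _ h')
      · cases o with
        | none => simp at h'; exact Or.inl (h' ▸ List.mem_cons_self)
        | some c =>
            by_cases hc : c.2 < x.2
            · simp [hc] at h'; exact Or.inl (h' ▸ List.mem_cons_self)
            · simp [hc] at h'; exact Or.inr (by simp [h'])

lemma pvMostCommon1_mem (L : List (Int × Int)) (b : Int × Int) (h : pvMostCommon1 L = some b) :
    b ∈ L := by
  rcases pvFold_mem L none b h with h' | h'
  · exact h'
  · simp at h'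

lemma pvFold_isSome (L : List (Int × Int)) (o : Option (Int × Int)) (h : o.isSome) :
    (L.foldl (fun best kv =>
      match best with
      | none => some kv
      | some b => if b.2 < kv.2 then some kv else some b) o).isSome := by
  induction L generalizing o with
  | nil => exact h
  | cons x L ih =>
      cases o with
      | none => simp at h
      | some c =>
          simp only [List.foldl_cons]
          by_cases hc : c.2 < x.2 <;> simp [hc] <;> exact ih _ rfl

lemma pvMostCommon1_isSome (L : List (Int × Int)) (h : L ≠ []) : (pvMostCommon1 L).isSome := by
  cases L with
  | nil => simp at h
  | cons x L => exact pvFold_isSome L (some x) rfl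

lemma pvMostCommonKey_mem (xs : List Int) (h : xs ≠ []) : pvMostCommonKey xs ∈ xs := by
  have hne : (PySem.Dict.counter xs).items ≠ [] := by
    have hm : xs.head h ∈ PySem.Set.ofList xs := by
      rw [PySem.Set.mem_ofList]; exact List.head_mem h
    simp only [PySem.Dict.items_counter]
    intro hc
    rw [List.map_eq_nil_iff] at hc
    rw [hc] at hm
    simp at hm
  have hs := pvMostCommon1_isSome _ hne
  obtain ⟨b, hb⟩ := Option.isSome_iff_exists.mp hs
  have hmem := pvMostCommon1_mem _ _ hb
  have : b.1 ∈ (PySem.Dict.counter xs).keys := PySem.Dict.mem_keys_of_mem_items _ hmem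
  rw [PySem.Dict.keys_counter, PySem.Set.mem_ofList] at this
  simpa [pvMostCommonKey, hb] using this

lemma pvBest_get (L : List ((Int × Int × Int) × Int)) (b0 : PySem.Dict (Int × Int) (Int × Int))
    (i j : Int) :
    (L.foldl (fun best kv =>
      match best.get? (kv.1.1, kv.1.2.1) with
      | none => best.insert (kv.1.1, kv.1.2.1) (kv.2, kv.1.2.2)
      | some cur =>
          if cur.1 < kv.2 then best.insert (kv.1.1, kv.1.2.1) (kv.2, kv.1.2.2) else best) b0).get? (i, j)
      = pvScan (b0.get? (i, j)) (pvProj L i j) := by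
  induction L generalizing b0 with
  | nil => rfl
  | cons kv L ih =>
      obtain ⟨⟨a, b, v⟩, c⟩ := kv
      simp only [List.foldl_cons]
      by_cases hcell : a = i ∧ b = j
      · obtain ⟨rfl, rfl⟩ := hcell
        rw [show pvProj (((a, b, v), c) :: L) a b = (v, c) :: pvProj L a b from by
          simp [pvProj]]
        cases hg : b0.get? (a, b) with
        | none =>
            rw [ih]
            simp [pvScan, pvProj, PySem.Dict.get?_insert_self]
        | some cur =>
            by_cases hlt : cur.1 < c
            · rw [ih]
              simp [pvScan, pvProj, hlt, PySem.Dict.get?_insert_self]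
            · rw [ih]
              simp [pvScan, pvProj, hg, hlt]
      · have hne : (i, j) ≠ (a, b) := by
          rintro hEq; injection hEq with h1 h2; exact hcell ⟨h1.symm, h2.symm⟩
        have hproj : pvProj (((a, b, v), c) :: L) i j = pvProj L i j := by
          simp only [pvProj, List.filterMap_cons]
          rw [if_neg (by simpa using hcell)]
        rw [hproj]
        cases hg : b0.get? (a, b) with
        | none =>
            rw [ih]
            rw [PySem.Dict.get?_insert_of_ne _ _ hne]
        | some cur =>
            by_cases hlt : cur.1 < c
            · rw [ih]
              simp [hlt, PySem.Dict.get?_insert_of_ne _ _ hne]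
            · rw [ih]
              simp [hlt]

lemma pvCnt_eq_counter (predictions : List (List (List Int))) (height width : Int) :
    pvCnt predictions height width = PySem.Dict.counter (pvT predictions height width) := by
  rw [← PySem.Dict.foldl_insert_getD_add_one_eq_counter]
  simp [pvCnt, pvT, List.foldl_flatMap, List.foldl_map]

lemma pvOfList_filterMap {α β : Type} [BEq α] [LawfulBEq α] [BEq β] [LawfulBEq β] (f : α → Option β)
    (hinj : ∀ a b v, f a = some v → f b = some v → a = b) (l : List α) :
    PySem.Set.ofList (l.filterMap f) = (PySem.Set.ofList l).filterMap f := by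
  induction l using List.reverseRecOn with
  | nil => rfl
  | append_singleton l a ih =>
      rw [List.filterMap_append, PySem.Set.ofList_append_singleton]
      cases hf : f a with
      | none =>
          rw [PySem.Set.add_eq_ite]
          split_ifs with hmem
          · simp [hf, ih]
          · simp [List.filterMap_append, hf, ih]
      | some v =>
          have hvmem : v ∈ PySem.Set.ofList (l.filterMap f) ↔ a ∈ PySem.Set.ofList l := by
            rw [PySem.Set.mem_ofList, PySem.Set.mem_ofList, List.mem_filterMap]
            constructor
            · rintro ⟨b, hb, hfb⟩
              rwa [hinj b a v hfb hf] at hb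
            · intro ha; exact ⟨a, ha, hf⟩
          rw [show List.filterMap f [a] = [v] from by simp [hf],
            PySem.Set.ofList_append_singleton, PySem.Set.add_eq_ite, PySem.Set.add_eq_ite]
          by_cases hmem : a ∈ PySem.Set.ofList l
          · rw [if_pos hmem, if_pos (hvmem.mpr hmem), ih]
          · rw [if_neg hmem, if_neg (fun h => hmem (hvmem.mp h))]
            simp [List.filterMap_append, hf, ih]

lemma pvProj_counter (T : List (Int × Int × Int)) (i j : Int) :
    pvProj (PySem.Dict.counter T).items i j
      = (PySem.Dict.counter (T.filterMap
          (fun t => if t.1 = i ∧ t.2.1 = j then some t.2.2 else none))).items := by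
  set f : Int × Int × Int → Option Int := fun t => if t.1 = i ∧ t.2.1 = j then some t.2.2 else none with hfdef
  have hinj : ∀ a b v, f a = some v → f b = some v → a = b := by
    rintro ⟨a1, a2, a3⟩ ⟨b1, b2, b3⟩ v ha hb
    simp only [hfdef] at ha hb
    split_ifs at ha hb with h1 h2 <;> simp_all
  set votes := T.filterMap f with hv
  rw [pvProj, PySem.Dict.items_counter, PySem.Dict.items_counter, List.filterMap_map]
  have hcnt : ∀ k : Int × Int × Int, (fun k => if k.1 = i ∧ k.2.1 = j then some (k.2.2, (T.count k : Int)) else none) k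
      = (fun k => if k.1 = i ∧ k.2.1 = j then some (k.2.2, (votes.count k.2.2 : Int)) else none) k := by
    rintro ⟨a, b, v⟩
    by_cases h : a = i ∧ b = j
    · obtain ⟨rfl, rfl⟩ := h
      simp only [if_pos (⟨rfl, rfl⟩ : (a, b, v).1 = a ∧ (a, b, v).2.1 = b)]
      have hcount : votes.count v = T.count (a, b, v) := by
        rw [hv, List.count_filterMap]
        rw [List.count_eq_countP]
        apply List.countP_congr
        rintro ⟨x, y, z⟩ _
        simp only [hfdef]
        by_cases hxy : x = a ∧ y = b
        · obtain ⟨rfl, rfl⟩ := hxy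
          simp [Prod.ext_iff]
        · simp [hxy, Prod.ext_iff]
          tauto
      rw [hcount]
    · simp [h]
  simp only [Function.comp_def]
  have hsplit : (fun k : Int × Int × Int => if k.1 = i ∧ k.2.1 = j then some (k.2.2, (T.count k : Int)) else none)
      = fun k => (f k).map (fun v => (v, (votes.count v : Int))) := by
    funext k
    have hk := hcnt k
    simp only at hk
    rw [hk]
    simp only [hfdef]; split_ifs <;> rfl
  rw [hsplit, ← List.map_filterMap, ← pvOfList_filterMap f hinj, ← hv]

lemma pvFilterMap_range_single {α : Type} (n k : Nat) (f : Nat → Option α) 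
    (hnone : ∀ m, m ≠ k → f m = none) :
    (List.range n).filterMap f = if k < n then (f k).toList else [] := by
  induction n with
  | zero => simp
  | succ n ih =>
      rw [List.range_succ, List.filterMap_append, ih]
      by_cases hk : k < n
      · rw [if_pos hk, if_pos (by omega)]
        simp [hnone n (by omega)]
      · by_cases hk2 : k = n
        · subst hk2
          simp only [if_neg hk, if_pos (Nat.lt_succ_self k), List.nil_append]
          cases hf : f k <;> simp [hf]
        · rw [if_neg hk, if_neg (by omega)]
          simp [hnone n (fun h => hk2 h.symm)]

lemma pvFlatMap_range_single {α : Type} (n k : Nat) (f : Nat → List α)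
    (hnone : ∀ m, m ≠ k → f m = []) :
    (List.range n).flatMap f = if k < n then f k else [] := by
  induction n with
  | zero => simp
  | succ n ih =>
      rw [List.range_succ, List.flatMap_append, ih]
      by_cases hk : k < n
      · rw [if_pos hk, if_pos (by omega)]
        simp [hnone n (by omega)]
      · by_cases hk2 : k = n
        · subst hk2
          simp [if_neg hk]
        · rw [if_neg hk, if_neg (by omega)]
          simp [hnone n (fun h => hk2 h.symm)]

lemma pvVotes_eq_proj (predictions : List (List (List Int))) (h0 w0 iN jN : Nat)
    (hi : iN < h0) (hj : jN < w0) :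
    pvVotes predictions (iN : Int) (jN : Int)
      = (pvT predictions (h0 : Int) (w0 : Int)).filterMap
          (fun t => if t.1 = (iN : Int) ∧ t.2.1 = (jN : Int) then some t.2.2 else none) := by
  rw [pvVotes, pvT, List.filterMap_flatMap, List.filterMap_eq_flatMap_toList]
  apply List.flatMap_congr
  intro p _
  simp only [List.filterMap_flatMap, List.filterMap_map, Function.comp_def]
  rw [show (min (h0 : Int) (p.length : Int)) = ((min h0 p.length : Nat) : Int) from by push_cast; rfl,
    pvRangeCast, List.flatMap_map,
    pvFlatMap_range_single (min h0 p.length) iN _ (by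
      intro m hm
      apply List.filterMap_eq_nil_iff.mpr
      intro j' _
      rw [if_neg]
      rintro ⟨h1, -⟩
      exact hm (by exact_mod_cast h1))]
  set row := PySem.List.pyGetD p (iN : Int) [] with hrow
  by_cases hip : iN < p.length
  · by_cases hjr : jN < row.length
    · rw [if_pos (show ((iN : Int)) < (p.length : Int) ∧ ((jN : Int)) < (row.length : Int) from
        ⟨by exact_mod_cast hip, by exact_mod_cast hjr⟩)]
      rw [if_pos (show iN < min h0 p.length by omega)]
      rw [show (min (w0 : Int) (row.length : Int)) = ((min w0 row.length : Nat) : Int) from by push_cast; rfl,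
        pvRangeCast, List.filterMap_map,
        pvFilterMap_range_single (min w0 row.length) jN _ (by
          intro m hm
          simp only [Function.comp_def]
          rw [if_neg]
          rintro ⟨-, h2⟩
          exact hm (by exact_mod_cast h2))]
      rw [if_pos (show jN < min w0 row.length by omega)]
      simp
    · rw [if_neg (by rintro ⟨-, h2⟩; exact hjr (by exact_mod_cast h2))]
      rw [if_pos (show iN < min h0 p.length by omega)]
      rw [show (min (w0 : Int) (row.length : Int)) = ((min w0 row.length : Nat) : Int) from by push_cast; rfl,
        pvRangeCast, List.filterMap_map,
        pvFilterMap_range_single (min w0 row.length) jN _ (by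
          intro m hm
          simp only [Function.comp_def]
          rw [if_neg]
          rintro ⟨-, h2⟩
          exact hm (by exact_mod_cast h2))]
      rw [if_neg (show ¬ jN < min w0 row.length by omega)]
      rfl
  · rw [if_neg (by rintro ⟨h1, -⟩; exact hip (by exact_mod_cast h1))]
    rw [if_neg (show ¬ iN < min h0 p.length by omega)]
    rfl


lemma pvCounterItems_ne (xs : List Int) (h : xs ≠ []) : (PySem.Dict.counter xs).items ≠ [] := by
  have hm : xs.head h ∈ PySem.Set.ofList xs := by
    rw [PySem.Set.mem_ofList]; exact List.head_mem h
  simp only [PySem.Dict.items_counter]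
  intro hc
  rw [List.map_eq_nil_iff] at hc
  rw [hc] at hm
  simp at hm

-- per-cell agreement of the two ports
lemma pvCell (predictions : List (List (List Int))) (h0 w0 iN jN : Nat)
    (hi : iN < h0) (hj : jN < w0) :
    (match (pvBest (pvCnt predictions (h0 : Int) (w0 : Int))).get? ((iN : Int), (jN : Int)) with
      | some cv => cv.2
      | none => 0)
    = (if (pvVotes predictions (iN : Int) (jN : Int)).isEmpty then (0 : Int)
       else pvMostCommonKey (pvVotes predictions (iN : Int) (jN : Int))) := by
  have hbest : (pvBest (pvCnt predictions (h0 : Int) (w0 : Int))).get? ((iN : Int), (jN : Int))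
      = pvScan none (pvProj (pvCnt predictions (h0 : Int) (w0 : Int)).items (iN : Int) (jN : Int)) := by
    rw [pvBest, pvBest_get]
    rw [PySem.Dict.get?_empty]
  rw [hbest, pvCnt_eq_counter, pvProj_counter, ← pvVotes_eq_proj predictions h0 w0 iN jN hi hj]
  set votes := pvVotes predictions (iN : Int) (jN : Int) with hv
  have hscan : pvScan none (PySem.Dict.counter votes).items
      = (pvMostCommon1 (PySem.Dict.counter votes).items).map Prod.swap := by
    have h := pvScan_eq_mostCommon (PySem.Dict.counter votes).items none
    simpa [pvMostCommon1] using h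
  rw [hscan]
  by_cases hve : votes.isEmpty
  · have hnil : votes = [] := by simpa using hve
    rw [if_pos hve]
    simp [hnil, pvMostCommon1, PySem.Dict.items_counter]
  · rw [if_neg hve]
    have hne : votes ≠ [] := by simpa using hve
    obtain ⟨b, hb⟩ := Option.isSome_iff_exists.mp
      (pvMostCommon1_isSome _ (pvCounterItems_ne votes hne))
    rw [hb]
    simp [pvMostCommonKey, hb, Prod.swap]

-- ===== VERDICT (by name: the statement is the Claim_ definition above) =====
theorem ensemble_predictions_py_spec : Claim_equal_ensemble_predictions_py := by
  intro predictions _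
  show ensemble_predictions_py predictions = ensemble_predictions_py_alt predictions
  unfold ensemble_predictions_py ensemble_predictions_py_alt
  by_cases h1 : predictions.length ≤ 1
  · simp [h1]
  · simp only [if_neg h1]
    by_cases h2 : (predictions.filterMap (fun p => if p.isEmpty then none else some ((p.length : Int)))).isEmpty
        || (predictions.filterMap (fun p => if p.isEmpty || (p.headD []).isEmpty then none else some (((p.headD []).length : Int)))).isEmpty
    · simp only [if_pos h2]
    · simp only [if_neg h2]
      rw [Bool.or_eq_true, not_or] at h2
      obtain ⟨hH, hW⟩ := h2
      have hHne : predictions.filterMap (fun p => if p.isEmpty then none else some ((p.length : Int))) ≠ [] := by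
        simpa [List.isEmpty_iff] using hH
      have hWne : predictions.filterMap (fun p => if p.isEmpty || (p.headD []).isEmpty then none else some (((p.headD []).length : Int))) ≠ [] := by
        simpa [List.isEmpty_iff] using hW
      obtain ⟨h0, hh0⟩ : ∃ n : Nat,
          pvMostCommonKey (predictions.filterMap (fun p => if p.isEmpty then none else some ((p.length : Int)))) = (n : Int) := by
        have hmem := pvMostCommonKey_mem _ hHne
        rw [List.mem_filterMap] at hmem
        obtain ⟨p, -, hp⟩ := hmem
        split_ifs at hp
        exact ⟨p.length, (Option.some_inj.mp hp).symm⟩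
      obtain ⟨w0, hw0⟩ : ∃ n : Nat,
          pvMostCommonKey (predictions.filterMap (fun p => if p.isEmpty || (p.headD []).isEmpty then none else some (((p.headD []).length : Int)))) = (n : Int) := by
        have hmem := pvMostCommonKey_mem _ hWne
        rw [List.mem_filterMap] at hmem
        obtain ⟨p, -, hp⟩ := hmem
        split_ifs at hp
        exact ⟨(p.headD []).length, (Option.some_inj.mp hp).symm⟩
      rw [hh0, hw0, pvRangeCast h0]
      rw [List.map_map, List.map_map]
      apply List.map_congr_left
      intro iN hiN
      rw [List.mem_range] at hiN
      simp only [Function.comp_def]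
      rw [pvRangeCast w0, List.map_map, List.map_map]
      apply List.map_congr_left
      intro jN hjN
      rw [List.mem_range] at hjN
      simp only [Function.comp_def]
      exact (pvCell predictions h0 w0 iN jN hiN hjN).symm
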